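-- pv_equiv track=rewrite | github.com/koheron2/itp-w1-create-box | create_box/main.py | create_special_box
-- ===== SOURCE A (Python) =====
-- def create_special_box(height, width, character):
--     box = ''
--     for i in range(height):
--         for j in range(width):
--             if i == 0 or i == height - 1 or j == 0 or j == width - 1:
--                 box += character
--             else:
--                 box += ' '
--         box += '\n'
--     return box
--
--     """while version
-- def create_box(height, width, character):
--     box = ''
--     count_height = 0
--     count_width = 0
--     while count_width < width and count_height < height:
--         box += character
--         count_width += 1
--         if count_width == width:
--             box += '\n'
--             count_width = 0
--             count_height += 1
--     return box"""
-- ===== SOURCE B (Python) =====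
-- def create_special_box(height, width, character):
--     if height <= 0:
--         return ''
--     full = character * width + '\n'
--     if width <= 2 or height <= 2:
--         return full * height
--     mid = character + ' ' * (width - 2) + character + '\n'
--     return full + mid * (height - 2) + full
-- ===== Notes on version B (the rewrite author's own statement) =====
-- stated objective: simpler
-- what changed: B replaces A's per-cell double loop (a branch executed height*width times) with closed-form row strings: the border row character*width+' ' and the interior row character+' '*(width-2)+character+' ', repeated and concatenated.
import Mathlib
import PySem

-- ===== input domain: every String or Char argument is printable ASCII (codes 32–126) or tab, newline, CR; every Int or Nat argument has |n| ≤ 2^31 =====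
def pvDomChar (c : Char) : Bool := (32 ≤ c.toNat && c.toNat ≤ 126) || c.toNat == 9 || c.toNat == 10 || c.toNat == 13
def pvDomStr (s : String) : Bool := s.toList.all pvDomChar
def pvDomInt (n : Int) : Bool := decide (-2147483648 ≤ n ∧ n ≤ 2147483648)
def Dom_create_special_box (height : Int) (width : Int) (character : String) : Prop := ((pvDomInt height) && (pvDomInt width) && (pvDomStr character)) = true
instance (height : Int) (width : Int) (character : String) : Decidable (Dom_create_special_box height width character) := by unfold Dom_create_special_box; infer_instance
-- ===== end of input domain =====

-- B builds the box row by row from closed-form row strings instead of A's per-cell double loop; objective: simpler.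

-- ===== PORT A =====
-- literal transliteration of A's nested for-loops with a string accumulator
def create_special_box (height : Int) (width : Int) (character : String) : String :=
  (PySem.List.pyRange 0 height 1).foldl (fun box i =>
    ((PySem.List.pyRange 0 width 1).foldl (fun box j =>
      if i == 0 || i == height - 1 || j == 0 || j == width - 1 then box ++ character
      else box ++ " ") box) ++ "\n") ""

-- ===== PORT B =====
-- concatenation of a list of strings (helper for Python's  s * n  string repetition)
def pyCat : List String → String
  | [] => ""
  | s :: l => s ++ pyCat l

-- Python's  s * n  on strings (n ≤ 0 gives "")
def pyMul (s : String) (n : Int) : String := pyCat (List.replicate n.toNat s)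

-- transliteration of Source B: closed-form rows, repeated
def create_special_box_alt (height : Int) (width : Int) (character : String) : String :=
  if height ≤ 0 then ""
  else
    let full := pyMul character width ++ "\n"
    if width ≤ 2 ∨ height ≤ 2 then pyMul full height
    else
      let mid := character ++ pyMul " " (width - 2) ++ character ++ "\n"
      full ++ pyMul mid (height - 2) ++ full

-- ===== PRECONDITION & SPEC =====
def Spec_create_special_box (height : Int) (width : Int) (character : String) (out : String) : Prop := out = create_special_box_alt height width character
instance (height : Int) (width : Int) (character : String) (out : String) : Decidable (Spec_create_special_box height width character out) := by unfold Spec_create_special_box; infer_instance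

-- ===== CLAIM (what is proved, stated in full; the proofs are below) =====
def Claim_equal_create_special_box : Prop := ∀ (height : Int) (width : Int) (character : String), Dom_create_special_box height width character → Spec_create_special_box height width character (create_special_box height width character)

-- ===== LEMMAS AND PROOFS =====

theorem str_empty_append (s : String) : "" ++ s = s := by simp

theorem pyCat_append (l₁ l₂ : List String) : pyCat (l₁ ++ l₂) = pyCat l₁ ++ pyCat l₂ := by
  induction l₁ with
  | nil => simp [pyCat]
  | cons s t ih => simp [pyCat, ih, String.append_assoc]

-- a fold 'box += g x' is the concatenation of the pieces
theorem foldl_str {α : Type} (l : List α) (g : α → String) (acc : String) :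
    l.foldl (fun b x => b ++ g x) acc = acc ++ pyCat (l.map g) := by
  induction l generalizing acc with
  | nil => simp [pyCat]
  | cons x t ih => simp [pyCat, ih, String.append_assoc]

-- constant pieces collapse to a repetition
theorem pyCat_map_const {α : Type} (l : List α) (g : α → String) (c : String)
    (h : ∀ x ∈ l, g x = c) :
    pyCat (l.map g) = pyCat (List.replicate l.length c) := by
  induction l with
  | nil => rfl
  | cons x t ih =>
      simp only [List.map_cons, List.length_cons, List.replicate_succ, pyCat]
      rw [h x (by simp), ih (fun y hy => h y (by simp [hy]))]

-- boundary shape: first and last pieces are `a`, all pieces in between are `b`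
theorem pyCat_boundary (f : Nat → String) (k : Nat) (a b : String)
    (h0 : f 0 = a) (hl : f (k + 1) = a) (hm : ∀ t, t < k → f (t + 1) = b) :
    pyCat ((List.range (k + 2)).map f) = a ++ pyCat (List.replicate k b) ++ a := by
  have h1 : List.range (k + 2) = 0 :: List.map Nat.succ (List.range (k + 1)) :=
    List.range_succ_eq_map
  rw [h1, List.map_cons, List.map_map, List.range_succ, List.map_append]
  have h2 : (List.range k).map (f ∘ Nat.succ) = List.replicate k b := by
    simpa using List.map_eq_replicate_iff.mpr (fun x hx => hm x (List.mem_range.mp hx))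
  rw [h2]
  simp [pyCat, pyCat_append, h0, hl, String.append_assoc]

-- the whole of A, as a concatenation of closed row strings
theorem A_as_rows (height width : Int) (character : String) :
    create_special_box height width character
    = pyCat ((List.range height.toNat).map (fun (k : Nat) =>
        pyCat ((List.range width.toNat).map (fun (j : Nat) =>
          if (k : Int) == 0 || (k : Int) == height - 1 || (j : Int) == 0 || (j : Int) == width - 1
          then character else " ")) ++ "\n")) := by
  unfold create_special_box
  have hbody : (fun (box : String) (i : Int) =>
      ((PySem.List.pyRange 0 width 1).foldl (fun box j =>
        if i == 0 || i == height - 1 || j == 0 || j == width - 1 then box ++ character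
        else box ++ " ") box) ++ "\n")
      = (fun (box : String) (i : Int) => box ++ (pyCat ((PySem.List.pyRange 0 width 1).map (fun j =>
          if i == 0 || i == height - 1 || j == 0 || j == width - 1 then character else " ")) ++ "\n")) := by
    funext box i
    have hcell : (fun (b : String) (j : Int) =>
        if i == 0 || i == height - 1 || j == 0 || j == width - 1 then b ++ character else b ++ " ")
        = (fun (b : String) (j : Int) =>
          b ++ (if i == 0 || i == height - 1 || j == 0 || j == width - 1 then character else " ")) := by
      funext b j
      split <;> rfl
    rw [hcell, foldl_str, String.append_assoc]
  rw [hbody, foldl_str, str_empty_append,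
      PySem.List.pyRange_one 0 height, PySem.List.pyRange_one 0 width]
  simp only [zero_add, sub_zero, List.map_map, Function.comp_def]

-- ===== VERDICT (by name: the statement is the Claim_ definition above) =====
theorem create_special_box_spec : Claim_equal_create_special_box := by
  intro height width character _
  unfold Spec_create_special_box
  rw [A_as_rows]
  unfold create_special_box_alt
  by_cases hh : height ≤ 0
  · rw [if_pos hh, show height.toNat = 0 from by omega]
    simp [pyCat]
  · rw [if_neg hh]
    by_cases hsmall : width ≤ 2 ∨ height ≤ 2
    · -- every row is the full border row
      rw [if_pos hsmall]
      simp only [pyMul]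
      have hrow : ∀ k ∈ List.range height.toNat,
          pyCat ((List.range width.toNat).map (fun (j : Nat) =>
            if (k : Int) == 0 || (k : Int) == height - 1 || (j : Int) == 0 || (j : Int) == width - 1
            then character else " ")) ++ "\n"
          = pyCat (List.replicate width.toNat character) ++ "\n" := by
        intro k hk
        have hk' := List.mem_range.mp hk
        congr 1
        rw [pyCat_map_const (List.range width.toNat) _ character (by
          intro j hj
          have hj' := List.mem_range.mp hj
          rcases hsmall with hw | hh2
          · have hj0 : (j : Int) = 0 ∨ (j : Int) = width - 1 := by omega
            rcases hj0 with e | e <;> simp [e]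
          · have hk0 : (k : Int) = 0 ∨ (k : Int) = height - 1 := by omega
            rcases hk0 with e | e <;> simp [e]), List.length_range]
      rw [List.map_congr_left hrow,
          pyCat_map_const (List.range height.toNat)
            (fun _ => pyCat (List.replicate width.toNat character) ++ "\n")
            (pyCat (List.replicate width.toNat character) ++ "\n") (fun x _ => rfl),
          List.length_range]
    · -- width ≥ 3 and height ≥ 3: top row, middle rows, bottom row
      rw [if_neg hsmall]
      simp only [pyMul]
      rcases not_or.mp hsmall with ⟨hw', hh2'⟩
      have hw2 : 2 < width := by omega
      have hh3 : 2 < height := by omega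
      have hfull : ∀ k : Nat, ((k : Int) = 0 ∨ (k : Int) = height - 1) →
          pyCat ((List.range width.toNat).map (fun (j : Nat) =>
            if (k : Int) == 0 || (k : Int) == height - 1 || (j : Int) == 0 || (j : Int) == width - 1
            then character else " ")) ++ "\n"
          = pyCat (List.replicate width.toNat character) ++ "\n" := by
        intro k hk
        congr 1
        rw [pyCat_map_const (List.range width.toNat) _ character (by
          intro j hj
          rcases hk with e | e <;> simp [e]), List.length_range]
      have hmid : ∀ t : Nat, t < height.toNat - 2 →
          pyCat ((List.range width.toNat).map (fun (j : Nat) =>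
            if ((t + 1 : Nat) : Int) == 0 || ((t + 1 : Nat) : Int) == height - 1 || (j : Int) == 0 || (j : Int) == width - 1
            then character else " ")) ++ "\n"
          = character ++ pyCat (List.replicate (width - 2).toNat " ") ++ character ++ "\n" := by
        intro t ht
        congr 1
        rw [show width.toNat = width.toNat - 2 + 2 from by omega,
            pyCat_boundary _ (width.toNat - 2) character " "]
        · rw [show (width - 2).toNat = width.toNat - 2 from by omega]
        · simp
        · have hj : ((width.toNat - 2 + 1 : Nat) : Int) = width - 1 := by omega
          simp [hj]
        · intro u hu
          simp
          intro hcon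
          exfalso
          omega
      rw [show height.toNat = height.toNat - 2 + 2 from by omega,
          pyCat_boundary _ (height.toNat - 2)
            (pyCat (List.replicate width.toNat character) ++ "\n")
            (character ++ pyCat (List.replicate (width - 2).toNat " ") ++ character ++ "\n")]
      · rw [show (height - 2).toNat = height.toNat - 2 from by omega]
      · exact hfull 0 (Or.inl (by simp))
      · exact hfull (height.toNat - 2 + 1) (Or.inr (by omega))
      · exact hmid
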